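-- pv_equiv track=rewrite | github.com/chrisguidry/docketeer | .github/scripts/affected-packages.py | compute_affected
-- ===== SOURCE A (Python) =====
-- def compute_affected(
--     changed_files: list[str],
--     members: list[str],
--     reverse_deps: dict[str, set[str]],
-- ) -> list[str]:
--     affected: set[str] = set()
--
--     for path in changed_files:
--         matched_member = None
--         for member in members:
--             if path.startswith(f"{member}/"):
--                 matched_member = member
--                 break
--
--         if matched_member is None:
--             return sorted(members)
--
--         relative = path[len(matched_member) + 1 :]
--
--         if relative.startswith("src/"):
--             affected.add(matched_member)
--             affected.update(reverse_deps.get(matched_member, set()))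
--         else:
--             affected.add(matched_member)
--
--     return sorted(affected)
-- ===== SOURCE B (Python) =====
-- def compute_affected(changed_files, members, reverse_deps):
--     # Member-centric sweep: walk the members in order with a shrinking pool of
--     # unclaimed paths; each member claims the pool paths under it (first-match
--     # tie-breaking falls out of the processing order), then the claimed paths
--     # are removed.  Any path left unclaimed at the end means everything is affected.
--     remaining = list(changed_files)
--     affected = set()
--     for member in members:
--         prefix = f"{member}/"
--         claimed = [p for p in remaining if p.startswith(prefix)]
--         if claimed:
--             affected.add(member)
--             if any(p[len(prefix):].startswith("src/") for p in claimed):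
--                 affected |= reverse_deps.get(member, set())
--             remaining = [p for p in remaining if not p.startswith(prefix)]
--     if remaining:
--         return sorted(members)
--     return sorted(affected)
-- ===== Notes on version B (the rewrite author's own statement) =====
-- stated objective: alternative
-- what changed: Replaces A's path-centric loop (inner scan of members per changed path, early return on a miss) with a member-centric sweep: iterate over members in order with a shrinking pool of unclaimed paths, each member claims and removes its matching paths and contributes its reverse deps if any claimed suffix is under src/; a non-empty leftover pool replaces the early return.
import Mathlib
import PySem

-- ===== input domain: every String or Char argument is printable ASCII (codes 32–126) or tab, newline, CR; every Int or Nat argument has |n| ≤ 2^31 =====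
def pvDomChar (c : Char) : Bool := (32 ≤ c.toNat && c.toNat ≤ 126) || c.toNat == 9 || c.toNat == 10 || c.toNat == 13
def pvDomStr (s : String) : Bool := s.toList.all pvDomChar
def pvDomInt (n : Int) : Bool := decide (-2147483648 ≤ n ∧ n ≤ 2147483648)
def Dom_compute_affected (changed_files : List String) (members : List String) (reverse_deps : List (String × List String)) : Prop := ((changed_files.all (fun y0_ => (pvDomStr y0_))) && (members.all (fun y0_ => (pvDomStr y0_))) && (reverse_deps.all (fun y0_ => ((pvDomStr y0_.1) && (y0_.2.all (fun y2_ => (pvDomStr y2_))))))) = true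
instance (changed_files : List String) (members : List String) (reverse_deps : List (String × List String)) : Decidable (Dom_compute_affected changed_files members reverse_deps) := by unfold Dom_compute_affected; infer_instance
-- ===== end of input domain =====

-- B replaces A's path-centric loop (scan members per path, early return on a miss) with a
-- member-centric sweep over members carrying a shrinking pool of unclaimed paths; objective: alternative.


-- ===== PORT A =====
-- inner 'for member in members: … break' loop (first member with path.startswith(member + "/"))
def pvFirstMatch (path : String) : List String → Option String
  | [] => none
  | m :: rest =>
    if PySem.Str.startswith path (m ++ "/") then some m else pvFirstMatch path rest

-- A's single loop over changed_files carrying the 'affected' set; early 'return sorted(members)' on no match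
def pvLoopA (members : List String) (reverse_deps : List (String × List String)) :
    List String → PySem.Set String → List String
  | [], affected => PySem.List.sorted affected (fun x => x) false
  | path :: rest, affected =>
    match pvFirstMatch path members with
    | none => PySem.List.sorted members (fun x => x) false
    | some m =>
      let relative := PySem.Str.slice path (some (PySem.Str.len m + 1)) none
      if PySem.Str.startswith relative "src/" then
        pvLoopA members reverse_deps rest
          (PySem.Set.update (PySem.Set.add affected m) ((PySem.Dict.mk reverse_deps).getD m []))
      else
        pvLoopA members reverse_deps rest (PySem.Set.add affected m)

def compute_affected (changed_files : List String) (members : List String) (reverse_deps : List (String × List String)) : List String :=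
  pvLoopA members reverse_deps changed_files PySem.Set.empty

-- ===== PORT B =====
-- B's member-centric sweep: each member claims (and removes) the pool paths under it
def pvLoopB (reverse_deps : List (String × List String)) :
    List String → List String → PySem.Set String → PySem.Set String × List String
  | [], remaining, affected => (affected, remaining)
  | member :: rest, remaining, affected =>
    let pre := member ++ "/"
    let claimed := remaining.filter (fun p => PySem.Str.startswith p pre)
    if claimed.isEmpty then
      pvLoopB reverse_deps rest remaining affected
    else
      let affected1 := PySem.Set.add affected member
      let affected2 :=
        if claimed.any (fun p =>
            PySem.Str.startswith (PySem.Str.slice p (some (PySem.Str.len pre)) none) "src/") then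
          PySem.Set.update affected1 ((PySem.Dict.mk reverse_deps).getD member [])
        else affected1
      pvLoopB reverse_deps rest (remaining.filter (fun p => !PySem.Str.startswith p pre)) affected2

def compute_affected_alt (changed_files : List String) (members : List String) (reverse_deps : List (String × List String)) : List String :=
  match pvLoopB reverse_deps members changed_files PySem.Set.empty with
  | (_, _ :: _) => PySem.List.sorted members (fun x => x) false
  | (affected, []) => PySem.List.sorted affected (fun x => x) false

-- ===== PRECONDITION & SPEC =====
def Spec_compute_affected (changed_files : List String) (members : List String) (reverse_deps : List (String × List String)) (out : List String) : Prop := out = compute_affected_alt changed_files members reverse_deps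
instance (changed_files : List String) (members : List String) (reverse_deps : List (String × List String)) (out : List String) : Decidable (Spec_compute_affected changed_files members reverse_deps out) := by unfold Spec_compute_affected; infer_instance

-- ===== CLAIM (what is proved, stated in full; the proofs are below) =====
def Claim_equal_compute_affected : Prop := ∀ (changed_files : List String) (members : List String) (reverse_deps : List (String × List String)), Dom_compute_affected changed_files members reverse_deps → Spec_compute_affected changed_files members reverse_deps (compute_affected changed_files members reverse_deps)

-- ===== LEMMAS AND PROOFS =====

-- the 'relative suffix is under src/' test, as both programs compute it
def pvSrcB (p m : String) : Bool :=
  PySem.Str.startswith (PySem.Str.slice p (some (PySem.Str.len m + 1)) none) "src/"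

-- what a path p matched to member m contributes to the affected set
def pvContrib (reverse_deps : List (String × List String)) (p m x : String) : Prop :=
  x = m ∨ (pvSrcB p m = true ∧ x ∈ (PySem.Dict.mk reverse_deps).getD m [])

-- A's accumulated set, separated from A's loop (paths with no match are skipped; A's loop never
-- consults the accumulator on those, it returns sorted(members) instead)
def pvSetA (members : List String) (reverse_deps : List (String × List String)) :
    List String → PySem.Set String → PySem.Set String
  | [], acc => acc
  | p :: rest, acc =>
    match pvFirstMatch p members with
    | none => pvSetA members reverse_deps rest acc
    | some m =>
      pvSetA members reverse_deps rest
        (if pvSrcB p m then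
           PySem.Set.update (PySem.Set.add acc m) ((PySem.Dict.mk reverse_deps).getD m [])
         else PySem.Set.add acc m)

theorem pvLen_pre (m : String) : PySem.Str.len (m ++ "/") = PySem.Str.len m + 1 := by
  rw [PySem.Str.len_append]; rfl

theorem pvLoopA_of_none (members : List String) (reverse_deps : List (String × List String)) :
    ∀ (paths : List String) (acc : PySem.Set String),
      (∃ p ∈ paths, pvFirstMatch p members = none) →
      pvLoopA members reverse_deps paths acc = PySem.List.sorted members (fun x => x) false := by
  intro paths
  induction paths with
  | nil => intro acc h; simp at h
  | cons p rest ih =>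
    intro acc h
    simp only [pvLoopA]
    cases hm : pvFirstMatch p members with
    | none => rfl
    | some m =>
      have : ∃ q ∈ rest, pvFirstMatch q members = none := by
        rcases h with ⟨q, hq, hqn⟩
        rcases List.mem_cons.mp hq with rfl | hq'
        · rw [hm] at hqn; cases hqn
        · exact ⟨q, hq', hqn⟩
      dsimp only
      split_ifs <;> exact ih _ this

theorem pvLoopA_of_all (members : List String) (reverse_deps : List (String × List String)) :
    ∀ (paths : List String) (acc : PySem.Set String),
      (∀ p ∈ paths, pvFirstMatch p members ≠ none) →
      pvLoopA members reverse_deps paths acc =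
        PySem.List.sorted (pvSetA members reverse_deps paths acc) (fun x => x) false := by
  intro paths
  induction paths with
  | nil => intro acc _; rfl
  | cons p rest ih =>
    intro acc h
    simp only [pvLoopA, pvSetA]
    cases hm : pvFirstMatch p members with
    | none => exact absurd hm (h p (by simp))
    | some m =>
      have hrest : ∀ q ∈ rest, pvFirstMatch q members ≠ none :=
        fun q hq => h q (List.mem_cons_of_mem _ hq)
      dsimp only
      have hcond : (PySem.Str.startswith
          (PySem.Str.slice p (some (PySem.Str.len m + 1)) none) "src/") = pvSrcB p m := rfl
      rw [hcond]
      by_cases hs : pvSrcB p m = true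
      · rw [if_pos hs, if_pos hs]; exact ih _ hrest
      · rw [if_neg hs, if_neg hs]; exact ih _ hrest

theorem pvSetA_nodup (members : List String) (reverse_deps : List (String × List String)) :
    ∀ (paths : List String) (acc : PySem.Set String), acc.Nodup →
      (pvSetA members reverse_deps paths acc).Nodup := by
  intro paths
  induction paths with
  | nil => intro acc h; exact h
  | cons p rest ih =>
    intro acc h
    simp only [pvSetA]
    cases hm : pvFirstMatch p members with
    | none => exact ih _ h
    | some m =>
      dsimp only
      apply ih
      split_ifs
      · exact PySem.Set.nodup_update _ _ (PySem.Set.nodup_add _ _ h)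
      · exact PySem.Set.nodup_add _ _ h

theorem pvSetA_mem (members : List String) (reverse_deps : List (String × List String)) :
    ∀ (paths : List String) (acc : PySem.Set String) (x : String),
      x ∈ pvSetA members reverse_deps paths acc ↔
        x ∈ acc ∨ ∃ p ∈ paths, ∃ m, pvFirstMatch p members = some m ∧ pvContrib reverse_deps p m x := by
  intro paths
  induction paths with
  | nil => intro acc x; simp [pvSetA]
  | cons p rest ih =>
    intro acc x
    simp only [pvSetA]
    cases hm : pvFirstMatch p members with
    | none =>
      dsimp only
      rw [ih]
      simp only [List.exists_mem_cons_iff, hm]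
      simp
    | some m =>
      dsimp only
      rw [ih]
      simp only [List.exists_mem_cons_iff, hm]
      have hacc : (x ∈ (if pvSrcB p m then
            PySem.Set.update (PySem.Set.add acc m) ((PySem.Dict.mk reverse_deps).getD m [])
          else PySem.Set.add acc m)) ↔
          x ∈ acc ∨ pvContrib reverse_deps p m x := by
        unfold pvContrib
        by_cases hs : pvSrcB p m = true
        · rw [if_pos hs, PySem.Set.mem_update, PySem.Set.mem_add]
          simp only [hs, true_and]
          rw [or_assoc]
        · rw [if_neg hs, PySem.Set.mem_add]
          constructor
          · rintro (h | h)
            exacts [Or.inl h, Or.inr (Or.inl h)]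
          · rintro (h | h | ⟨hs', -⟩)
            exacts [Or.inl h, Or.inr h, absurd hs' hs]
      rw [hacc]
      constructor
      · rintro (h | h) 
        · rcases h with h | h
          · exact Or.inl h
          · exact Or.inr (Or.inl ⟨m, rfl, h⟩)
        · exact Or.inr (Or.inr h)
      · rintro (h | ⟨m', hm', hc⟩ | h)
        · exact Or.inl (Or.inl h)
        · cases hm'; exact Or.inl (Or.inr hc)
        · exact Or.inr h

-- B's loop, characterised: leftover pool and affected-set membership
theorem pvLoopB_spec (reverse_deps : List (String × List String)) :
    ∀ (ms R : List String) (acc : PySem.Set String),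
      (pvLoopB reverse_deps ms R acc).2 = R.filter (fun p => (pvFirstMatch p ms).isNone)
      ∧ (acc.Nodup → (pvLoopB reverse_deps ms R acc).1.Nodup)
      ∧ ∀ x, x ∈ (pvLoopB reverse_deps ms R acc).1 ↔
          x ∈ acc ∨ ∃ p ∈ R, ∃ m, pvFirstMatch p ms = some m ∧ pvContrib reverse_deps p m x := by
  intro ms
  induction ms with
  | nil =>
    intro R acc
    refine ⟨?_, fun h => h, ?_⟩
    · simp [pvLoopB, pvFirstMatch]
    · intro x; simp [pvLoopB, pvFirstMatch]
  | cons m rest ih =>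
    intro R acc
    have hFM : ∀ p, pvFirstMatch p (m :: rest) =
        if PySem.Str.startswith p (m ++ "/") then some m else pvFirstMatch p rest := fun p => rfl
    simp only [pvLoopB]
    by_cases hcl : (R.filter (fun p => PySem.Str.startswith p (m ++ "/"))).isEmpty
    · -- no path in the pool is under this member
      have hno : ∀ p ∈ R, PySem.Str.startswith p (m ++ "/") = false := by
        intro p hp
        by_contra h
        have : p ∈ R.filter (fun p => PySem.Str.startswith p (m ++ "/")) :=
          List.mem_filter.mpr ⟨hp, by simpa using h⟩
        rw [List.isEmpty_iff.mp hcl] at this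
        cases this
      have hsame : ∀ p ∈ R, pvFirstMatch p (m :: rest) = pvFirstMatch p rest := by
        intro p hp; rw [hFM p, hno p hp]; simp
      rw [if_pos hcl]
      obtain ⟨h2, hnd, hmem⟩ := ih R acc
      refine ⟨?_, hnd, ?_⟩
      · rw [h2]; exact (List.filter_congr (fun p hp => by rw [hsame p hp])).symm
      · intro x
        rw [hmem x]
        constructor
        · rintro (h | ⟨p, hp, m', hm', hc⟩)
          · exact Or.inl h
          · exact Or.inr ⟨p, hp, m', by rw [hsame p hp]; exact hm', hc⟩
        · rintro (h | ⟨p, hp, m', hm', hc⟩)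
          · exact Or.inl h
          · exact Or.inr ⟨p, hp, m', by rw [← hsame p hp]; exact hm', hc⟩
    · -- this member claims at least one pool path
      rw [if_neg hcl]
      obtain ⟨p0, hp0R, hp0⟩ : ∃ p ∈ R, PySem.Str.startswith p (m ++ "/") = true := by
        have hne : R.filter (fun p => PySem.Str.startswith p (m ++ "/")) ≠ [] := by
          intro hEq
          exact hcl (by rw [hEq]; rfl)
        rcases List.exists_mem_of_ne_nil _ hne with ⟨p, hp⟩
        rcases List.mem_filter.mp hp with ⟨h1, h2⟩
        exact ⟨p, h1, h2⟩
      have hsrcB : ∀ p : String,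
          (PySem.Str.startswith
            (PySem.Str.slice p (some (PySem.Str.len (m ++ "/"))) none) "src/") = pvSrcB p m := by
        intro p; rw [pvLen_pre]; rfl
      have hany : ((R.filter (fun p => PySem.Str.startswith p (m ++ "/"))).any (fun p =>
            PySem.Str.startswith (PySem.Str.slice p (some (PySem.Str.len (m ++ "/"))) none) "src/") = true)
          ↔ ∃ p ∈ R, PySem.Str.startswith p (m ++ "/") = true ∧ pvSrcB p m = true := by
        simp only [List.any_eq_true, List.mem_filter]
        constructor
        · rintro ⟨p, ⟨hpR, hsw⟩, hs⟩
          exact ⟨p, hpR, by simpa using hsw, by rw [← hsrcB p]; exact hs⟩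
        · rintro ⟨p, hpR, hsw, hs⟩
          exact ⟨p, ⟨hpR, by simpa using hsw⟩, by rw [hsrcB p]; exact hs⟩
      set acc2 := (if (R.filter (fun p => PySem.Str.startswith p (m ++ "/"))).any (fun p =>
            PySem.Str.startswith (PySem.Str.slice p (some (PySem.Str.len (m ++ "/"))) none) "src/") then
          PySem.Set.update (PySem.Set.add acc m) ((PySem.Dict.mk reverse_deps).getD m [])
        else PySem.Set.add acc m) with hacc2
      obtain ⟨h2, hnd, hmem⟩ := ih (R.filter (fun p => !PySem.Str.startswith p (m ++ "/"))) acc2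
      have hacc2mem : ∀ x, x ∈ acc2 ↔ x ∈ acc ∨ x = m ∨
          ((∃ p ∈ R, PySem.Str.startswith p (m ++ "/") = true ∧ pvSrcB p m = true) ∧
            x ∈ (PySem.Dict.mk reverse_deps).getD m []) := by
        intro x
        rw [hacc2]
        split_ifs with hA
        · rw [hany] at hA
          rw [PySem.Set.mem_update, PySem.Set.mem_add]
          simp only [hA, true_and]
          rw [or_assoc]
        · rw [hany] at hA
          rw [PySem.Set.mem_add]
          constructor
          · rintro (h | h)
            exacts [Or.inl h, Or.inr (Or.inl h)]
          · rintro (h | h | ⟨hE, -⟩)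
            exacts [Or.inl h, Or.inr h, absurd hE hA]
      refine ⟨?_, ?_, ?_⟩
      · rw [h2, List.filter_filter]
        apply List.filter_congr
        intro p hp
        rw [hFM p]
        cases hsw : PySem.Str.startswith p (m ++ "/") <;> simp
      · intro hndacc
        apply hnd
        rw [hacc2]
        split_ifs
        · exact PySem.Set.nodup_update _ _ (PySem.Set.nodup_add _ _ hndacc)
        · exact PySem.Set.nodup_add _ _ hndacc
      · intro x
        rw [hmem x, hacc2mem x]
        constructor
        · rintro ((h | h | ⟨⟨p, hpR, hsw, hs⟩, hdep⟩) | ⟨p, hp, m', hm', hc⟩)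
          · exact Or.inl h
          · exact Or.inr ⟨p0, hp0R, m, by rw [hFM p0, hp0]; rfl, Or.inl h⟩
          · exact Or.inr ⟨p, hpR, m, by rw [hFM p, hsw]; rfl, Or.inr ⟨hs, hdep⟩⟩
          · rcases List.mem_filter.mp hp with ⟨hpR, hnsw⟩
            refine Or.inr ⟨p, hpR, m', ?_, hc⟩
            rw [hFM p]
            have hswf : PySem.Str.startswith p (m ++ "/") = false := by
              cases h : PySem.Str.startswith p (m ++ "/")
              · rfl
              · simp only [h, Bool.not_true] at hnsw
                cases hnsw
            rw [hswf]; simpa using hm'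
        · rintro (h | ⟨p, hpR, m', hm', hc⟩)
          · exact Or.inl (Or.inl h)
          · rw [hFM p] at hm'
            by_cases hsw : PySem.Str.startswith p (m ++ "/") = true
            · rw [if_pos hsw] at hm'
              cases hm'
              rcases hc with rfl | ⟨hs, hdep⟩
              · exact Or.inl (Or.inr (Or.inl rfl))
              · exact Or.inl (Or.inr (Or.inr ⟨⟨p, hpR, hsw, hs⟩, hdep⟩))
            · rw [if_neg hsw] at hm'
              refine Or.inr ⟨p, List.mem_filter.mpr ⟨hpR, by simpa using hsw⟩, m', hm', hc⟩

-- ===== VERDICT (by name: the statement is the Claim_ definition above) =====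
theorem compute_affected_spec : Claim_equal_compute_affected := by
  intro changed_files members reverse_deps _
  unfold Spec_compute_affected compute_affected compute_affected_alt
  obtain ⟨h2, hnd, hmem⟩ := pvLoopB_spec reverse_deps members changed_files PySem.Set.empty
  rcases hLB : pvLoopB reverse_deps members changed_files PySem.Set.empty with ⟨S, Rr⟩
  rw [hLB] at h2 hnd hmem
  simp only at h2 hnd hmem
  by_cases h : ∃ p ∈ changed_files, pvFirstMatch p members = none
  · rw [pvLoopA_of_none members reverse_deps changed_files PySem.Set.empty h]
    rcases h with ⟨p, hp, hpn⟩
    have hpf : p ∈ Rr := by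
      rw [h2]; exact List.mem_filter.mpr ⟨hp, by simp [hpn]⟩
    cases Rr with
    | nil => cases hpf
    | cons a l => rfl
  · push_neg at h
    rw [pvLoopA_of_all members reverse_deps changed_files PySem.Set.empty h]
    have hnil : Rr = [] := by
      rw [h2, List.filter_eq_nil_iff]
      intro p hp
      cases hfm : pvFirstMatch p members with
      | none => exact absurd hfm (h p hp)
      | some m => simp
    subst hnil
    show PySem.List.sorted (pvSetA members reverse_deps changed_files PySem.Set.empty) (fun x => x) false
        = PySem.List.sorted S (fun x => x) false
    rw [PySem.List.sorted_id_eq_sorted_id_iff_perm]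
    rw [List.perm_ext_iff_of_nodup
      (pvSetA_nodup members reverse_deps changed_files PySem.Set.empty List.nodup_nil)
      (hnd List.nodup_nil)]
    intro x
    rw [pvSetA_mem, hmem x]
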